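-- pv_equiv track=rewrite | github.com/jawjay/mj-beats-vegas | Cleaning/preProcess.py | clean2015
-- ===== SOURCE A (Python) =====
-- def clean2015(res_2015,bet_lines):
--     '''
--     hardcode in last set of games for 2015:2016 season
--     NEED TO FIX SO IT DOESNT NEED THIS
--     '''
--     for g in sorted(bet_lines):
--         bet_lines[g] = bet_lines[g][-4:]
--     notworking = [x.upper() for x in 'dal hou cho mil min was bos brk cle chi lal pho por gsw'.split(' ')]
--     ans = ['5 187.5 52-34','15 220 64-44','7.5 211 66-50','4.5 201.5 46-62',
--         '10 212.5 72-50','-9 210 57-59','4.5 206 38-62','-5.5 206.5 47-49','4 194 44-58',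
--             '9.5 210 51-60','-3.5 196 42-57','5 205.5 62-55','10 217 58-56','17.5 212.5 70-50']
--     scores = '91-96 116-81 117-103 92-97 144-109 109-98 98-88 96-103 110-112 115-105 101-96 114-105 107-99 125-104'.split(' ')
--     fix = dict(zip(notworking,zip(scores,[x.split(' ') for x in ans])))
--
--     for g in sorted(res_2015)[1216:1230]:
--         a = fix[g[-3:]]
--         bet_lines[g] = [a[0].split('-')] + [[x] for x in a[1] ]
--
--
--     for b in sorted(bet_lines):
--         bet_lines[b] = [x[0] for x in bet_lines[b][1:]]
--     return bet_lines
-- ===== SOURCE B (Python) =====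
-- # Single-pass rebuild: no sorting of the dict keys, no intermediate truncation pass,
-- # and the final per-key values from the hardcoded fixup table are stored directly
-- # (the interleaved score row A builds is dropped again by A's own last pass).
-- # Unlike A, this builds a fresh dict instead of mutating bet_lines in place
-- # (return value is identical).
--
-- FIX = {
--     'DAL': ['5', '187.5', '52-34'],
--     'HOU': ['15', '220', '64-44'],
--     'CHO': ['7.5', '211', '66-50'],
--     'MIL': ['4.5', '201.5', '46-62'],
--     'MIN': ['10', '212.5', '72-50'],
--     'WAS': ['-9', '210', '57-59'],
--     'BOS': ['4.5', '206', '38-62'],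
--     'BRK': ['-5.5', '206.5', '47-49'],
--     'CLE': ['4', '194', '44-58'],
--     'CHI': ['9.5', '210', '51-60'],
--     'LAL': ['-3.5', '196', '42-57'],
--     'PHO': ['5', '205.5', '62-55'],
--     'POR': ['10', '217', '58-56'],
--     'GSW': ['17.5', '212.5', '70-50'],
-- }
--
--
-- def clean2015(res_2015, bet_lines):
--     patch = {}
--     for g in sorted(res_2015)[1216:1230]:
--         patch[g] = FIX[g[-3:]]
--     out = {}
--     for k, v in bet_lines.items():
--         if k in patch:
--             out[k] = patch[k]
--         else:
--             out[k] = [x[0] for x in v[max(1, len(v) - 3):]]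
--     for g, parts in patch.items():
--         if g not in out:
--             out[g] = parts
--     return out
-- ===== Notes on version B (the rewrite author's own statement) =====
-- stated objective: simpler
-- what changed: B replaces A's three mutation passes over the dict (two of them over sorted key lists) by one unsorted rebuild pass whose per-entry value is computed in closed form, with the fourteen final fixup rows hardcoded directly (A's interleaved score row is dropped again by A's own last pass, so B never builds it); B returns a fresh dict instead of mutating bet_lines in place (equal return value).
import Mathlib
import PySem

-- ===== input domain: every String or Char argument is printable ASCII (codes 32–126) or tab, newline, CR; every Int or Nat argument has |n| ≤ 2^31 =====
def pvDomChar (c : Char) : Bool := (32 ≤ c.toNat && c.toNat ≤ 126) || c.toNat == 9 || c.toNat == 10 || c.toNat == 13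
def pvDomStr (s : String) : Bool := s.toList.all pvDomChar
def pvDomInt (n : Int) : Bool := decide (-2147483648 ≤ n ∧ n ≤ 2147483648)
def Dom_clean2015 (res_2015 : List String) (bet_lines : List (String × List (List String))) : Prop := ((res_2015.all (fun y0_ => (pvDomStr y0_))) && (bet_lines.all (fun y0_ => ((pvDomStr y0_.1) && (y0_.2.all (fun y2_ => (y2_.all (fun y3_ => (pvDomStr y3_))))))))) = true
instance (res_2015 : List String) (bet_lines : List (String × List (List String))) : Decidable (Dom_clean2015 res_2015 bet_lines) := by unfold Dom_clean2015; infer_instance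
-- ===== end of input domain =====

-- B rebuilds the dict in one unsorted pass with the final values precomputed (simpler, no key
-- sorts); A mutates bet_lines in place while B builds a fresh dict — the RETURN value is what is
-- proved equal here.

-- ===== PORT A =====
-- sorted(res_2015)[1216:1230] (shared by both ports and Pre_)
def pvSel (res_2015 : List String) : List String :=
  PySem.List.slice (PySem.List.sorted res_2015 (fun x => x) false) (some 1216) (some 1230)

-- bet_lines[g][-4:]
def pvTr (v : List (List String)) : List (List String) := PySem.List.slice v (some (-4)) none

-- notworking = [x.upper() for x in '...'.split(' ')]   (sep ' ' ≠ '' so split? is some)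
def pvNotworking : List String :=
  ((PySem.Str.split? "dal hou cho mil min was bos brk cle chi lal pho por gsw" " ").getD []).map PySem.Str.upper

def pvAns : List String :=
  ["5 187.5 52-34", "15 220 64-44", "7.5 211 66-50", "4.5 201.5 46-62",
   "10 212.5 72-50", "-9 210 57-59", "4.5 206 38-62", "-5.5 206.5 47-49", "4 194 44-58",
   "9.5 210 51-60", "-3.5 196 42-57", "5 205.5 62-55", "10 217 58-56", "17.5 212.5 70-50"]

def pvScores : List String :=
  (PySem.Str.split? "91-96 116-81 117-103 92-97 144-109 109-98 98-88 96-103 110-112 115-105 101-96 114-105 107-99 125-104" " ").getD []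

-- fix = dict(zip(notworking, zip(scores, [x.split(' ') for x in ans])))
def pvFix : PySem.Dict String (String × List String) :=
  PySem.Dict.ofList (pvNotworking.zip (pvScores.zip (pvAns.map (fun x => (PySem.Str.split? x " ").getD []))))

-- a = fix[g[-3:]]; bet_lines[g] = [a[0].split('-')] + [[x] for x in a[1]]
-- (KeyError when g[-3:] is not a fix key: excluded by Pre_, the default is never used there)
def pvW (g : String) : List (List String) :=
  let a := pvFix.getD (PySem.Str.slice g (some (-3)) none) ("", [])
  [(PySem.Str.split? a.1 "-").getD []] ++ a.2.map (fun x => [x])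

-- [x[0] for x in v[1:]]   (x[0] IndexError on an empty row: excluded by Pre_)
def pvH (v : List (List String)) : List String :=
  (PySem.List.slice v (some 1) none).map (fun x => (PySem.List.pyGet? x 0).getD "")

-- for g in sorted(bet_lines): bet_lines[g] = bet_lines[g][-4:]
def pvStep1 (d0 : PySem.Dict String (List (List String))) : PySem.Dict String (List (List String)) :=
  (PySem.List.sorted d0.keys (fun x => x) false).foldl
    (fun d g => d.insert g (pvTr (d.getD g []))) d0

-- for g in sorted(res_2015)[1216:1230]: bet_lines[g] = [a[0].split('-')] + [[x] for x in a[1]]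
def pvStep2 (res_2015 : List String) (d : PySem.Dict String (List (List String))) : PySem.Dict String (List (List String)) :=
  (pvSel res_2015).foldl (fun d g => d.insert g (pvW g)) d

def clean2015 (res_2015 : List String) (bet_lines : List (String × List (List String))) : List (String × List String) :=
  -- for b in sorted(bet_lines): bet_lines[b] = [x[0] for x in bet_lines[b][1:]]
  -- the Python loop re-assigns every key exactly once, reading only that key's old value, in
  -- place (the value TYPE changes, which one Lean Dict cannot hold); it is ported as the
  -- order-preserving rewrite of the items, which is exactly its effect on the returned dict
  (pvStep2 res_2015 (pvStep1 (PySem.Dict.ofList bet_lines))).items.map (fun kv => (kv.1, pvH kv.2))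

-- ===== PORT B =====
def pvFixB : PySem.Dict String (List String) :=
  PySem.Dict.ofList
    [("DAL", ["5", "187.5", "52-34"]), ("HOU", ["15", "220", "64-44"]),
     ("CHO", ["7.5", "211", "66-50"]), ("MIL", ["4.5", "201.5", "46-62"]),
     ("MIN", ["10", "212.5", "72-50"]), ("WAS", ["-9", "210", "57-59"]),
     ("BOS", ["4.5", "206", "38-62"]), ("BRK", ["-5.5", "206.5", "47-49"]),
     ("CLE", ["4", "194", "44-58"]), ("CHI", ["9.5", "210", "51-60"]),
     ("LAL", ["-3.5", "196", "42-57"]), ("PHO", ["5", "205.5", "62-55"]),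
     ("POR", ["10", "217", "58-56"]), ("GSW", ["17.5", "212.5", "70-50"])]

-- patch[g] = FIX[g[-3:]]   (KeyError excluded by Pre_)
def pvP (g : String) : List String := pvFixB.getD (PySem.Str.slice g (some (-3)) none) []

-- [x[0] for x in v[max(1, len(v) - 3):]]   (x[0] IndexError excluded by Pre_)
def pvHB (v : List (List String)) : List String :=
  (PySem.List.slice v (some ((max 1 (v.length - 3) : Nat) : Int)) none).map
    (fun x => (PySem.List.pyGet? x 0).getD "")

-- patch = {}; for g in sorted(res_2015)[1216:1230]: patch[g] = FIX[g[-3:]]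
def pvPatch (res_2015 : List String) : PySem.Dict String (List String) :=
  (pvSel res_2015).foldl (fun p g => p.insert g (pvP g))
    (PySem.Dict.ofList ([] : List (String × List String)))

-- out = {}; for k, v in bet_lines.items(): out[k] = patch[k] if k in patch else [...]
def pvOut1 (res_2015 : List String) (bet_lines : List (String × List (List String))) : PySem.Dict String (List String) :=
  (PySem.Dict.ofList bet_lines).items.foldl
    (fun o kv => o.insert kv.1
      (if (pvPatch res_2015).contains kv.1 then (pvPatch res_2015).getD kv.1 [] else pvHB kv.2))
    (PySem.Dict.ofList ([] : List (String × List String)))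

def clean2015_alt (res_2015 : List String) (bet_lines : List (String × List (List String))) : List (String × List String) :=
  -- for g, parts in patch.items(): if g not in out: out[g] = parts
  ((pvPatch res_2015).items.foldl
    (fun o gp => if o.contains gp.1 then o else o.insert gp.1 gp.2) (pvOut1 res_2015 bet_lines)).items

-- ===== PRECONDITION & SPEC =====
def pvFixKeys : List String :=
  ["DAL", "HOU", "CHO", "MIL", "MIN", "WAS", "BOS", "BRK", "CLE", "CHI", "LAL", "PHO", "POR", "GSW"]

-- Pre_ excludes exactly the inputs where Python A raises: a KeyError when some selected game's
-- last three characters are not one of the 14 hardcoded team codes, and an IndexError when a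
-- surviving row of a non-patched value is the empty list.
def Pre_clean2015 (res_2015 : List String) (bet_lines : List (String × List (List String))) : Prop :=
  (∀ g ∈ pvSel res_2015, PySem.Str.slice g (some (-3)) none ∈ pvFixKeys) ∧
  (∀ kv ∈ bet_lines, kv.1 ∉ pvSel res_2015 → ∀ x ∈ kv.2.drop (max 1 (kv.2.length - 3)), x ≠ ([] : List String))

instance (res_2015 : List String) (bet_lines : List (String × List (List String))) : Decidable (Pre_clean2015 res_2015 bet_lines) := by unfold Pre_clean2015; infer_instance

def pvWitness_clean2015 : List String × (List (String × List (List String))) :=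
  ([], [("AA", [["1"], ["2"]])])

def Spec_clean2015 (res_2015 : List String) (bet_lines : List (String × List (List String))) (out : List (String × List String)) : Prop := out = clean2015_alt res_2015 bet_lines
instance (res_2015 : List String) (bet_lines : List (String × List (List String))) (out : List (String × List String)) : Decidable (Spec_clean2015 res_2015 bet_lines out) := by unfold Spec_clean2015; infer_instance

-- ===== CLAIM (what is proved, stated in full; the proofs are below) =====
def Claim_equal_clean2015 : Prop := ∀ (res_2015 : List String) (bet_lines : List (String × List (List String))), Dom_clean2015 res_2015 bet_lines → Pre_clean2015 res_2015 bet_lines → Spec_clean2015 res_2015 bet_lines (clean2015 res_2015 bet_lines)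

-- ===== LEMMAS AND PROOFS =====

-- the keys first inserted by a loop of dict assignments, in first-assignment order
def pvFirstOcc : List String → List String
  | [] => []
  | g :: r => g :: (pvFirstOcc r).filter (fun x => x != g)

theorem pv_mem_firstOcc (x : String) (l : List String) : x ∈ pvFirstOcc l ↔ x ∈ l := by
  induction l with
  | nil => simp [pvFirstOcc]
  | cons g r ih =>
    by_cases hx : x = g <;> simp [pvFirstOcc, List.mem_filter, hx, ih]

theorem pv_nodup_firstOcc (l : List String) : (pvFirstOcc l).Nodup := by
  induction l with
  | nil => simp [pvFirstOcc]
  | cons g r ih =>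
    refine List.Nodup.cons ?_ (ih.filter _)
    intro hg
    simp [List.mem_filter] at hg

theorem pv_items_foldl_insert_getD {ν : Type} (f : ν → ν) (dflt : ν) (L : List String)
    (d : PySem.Dict String ν) (hnd : d.keys.Nodup) (hL : L.Nodup)
    (hsub : ∀ g ∈ L, d.contains g = true) :
    (L.foldl (fun d g => d.insert g (f (d.getD g dflt))) d).items
      = d.items.map (fun kv => if kv.1 ∈ L then (kv.1, f kv.2) else kv) := by
  induction L generalizing d with
  | nil => simp
  | cons g L ih =>
    have hc : d.contains g = true := hsub g (List.mem_cons_self ..)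
    simp only [List.foldl_cons]
    rw [ih (d.insert g (f (d.getD g dflt))) (PySem.Dict.nodup_keys_insert _ _ _ hnd)
        (List.nodup_cons.mp hL).2
        (fun x hx => by
          rw [PySem.Dict.contains_insert]
          simp [hsub x (List.mem_cons_of_mem _ hx)])]
    rw [PySem.Dict.items_insert_of_contains d _ hc, List.map_map]
    apply List.map_congr_left
    rintro ⟨k, v⟩ hp
    by_cases hk : k = g
    · subst hk
      have hd : d.getD k dflt = v := PySem.Dict.getD_of_mem_items d hp hnd dflt
      have hkL : k ∉ L := (List.nodup_cons.mp hL).1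
      simp [hd, hkL]
    · simp [hk]

theorem pv_items_foldl_insert_fun {ν : Type} (w : String → ν) (sel : List String)
    (d : PySem.Dict String ν) (hnd : d.keys.Nodup) :
    (sel.foldl (fun d g => d.insert g (w g)) d).items
      = d.items.map (fun kv => if kv.1 ∈ sel then (kv.1, w kv.1) else kv)
        ++ ((pvFirstOcc sel).filter (fun g => !(d.contains g))).map (fun g => (g, w g)) := by
  induction sel generalizing d with
  | nil => simp [pvFirstOcc]
  | cons g rest ih =>
    simp only [List.foldl_cons]
    rw [ih (d.insert g (w g)) (PySem.Dict.nodup_keys_insert _ _ _ hnd)]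
    have hcongrF : ((pvFirstOcc rest).filter (fun x => !((d.insert g (w g)).contains x)))
        = (pvFirstOcc rest).filter (fun x => !(x == g) && !(d.contains x)) := by
      apply List.filter_congr
      intro x _
      rw [PySem.Dict.contains_insert]
      simp [Bool.not_or]
    by_cases hc : d.contains g = true
    · rw [PySem.Dict.items_insert_of_contains d _ hc, List.map_map, hcongrF]
      have hR : (pvFirstOcc (g :: rest)).filter (fun x => !(d.contains x))
          = (pvFirstOcc rest).filter (fun x => !(x == g) && !(d.contains x)) := by
        show ((g :: (pvFirstOcc rest).filter (fun x => x != g)).filter (fun x => !(d.contains x)))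
            = _
        rw [List.filter_cons_of_neg (by simp [hc]), List.filter_filter]
        apply List.filter_congr
        intro x _
        simp [bne, Bool.and_comm]
      rw [hR]
      congr 1
      apply List.map_congr_left
      rintro ⟨k, v⟩ hp
      by_cases hk : k = g
      · subst hk
        by_cases hkr : k ∈ rest <;> simp [hkr]
      · simp [hk]
    · have hc' : d.contains g = false := by
        cases h : d.contains g
        · rfl
        · exact absurd h hc
      rw [PySem.Dict.items_insert_of_not_contains d _ hc', List.map_append, hcongrF]
      have hgk : g ∉ d.keys := fun hm =>
        hc ((PySem.Dict.contains_iff_mem_keys d g).mpr hm)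
      have hR : (pvFirstOcc (g :: rest)).filter (fun x => !(d.contains x))
          = g :: (pvFirstOcc rest).filter (fun x => !(x == g) && !(d.contains x)) := by
        show ((g :: (pvFirstOcc rest).filter (fun x => x != g)).filter (fun x => !(d.contains x)))
            = _
        rw [List.filter_cons_of_pos (by simp [hc']), List.filter_filter]
        congr 1
        apply List.filter_congr
        intro x _
        simp [bne, Bool.and_comm]
      rw [hR]
      have hsingle : (fun kv => if kv.1 ∈ rest then (kv.1, w kv.1) else kv) (g, w g) = (g, w g) := by
        by_cases hgr : g ∈ rest <;> simp [hgr]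
      simp only [List.map_cons, hsingle, List.map_nil]
      rw [List.append_assoc, List.singleton_append]
      congr 1
      apply List.map_congr_left
      rintro ⟨k, v⟩ hp
      have hk : k ≠ g := by
        intro h
        subst h
        exact hgk (by
          have : (k, v).1 ∈ d.items.map Prod.fst := List.mem_map_of_mem hp
          simpa [PySem.Dict.keys] using this)
      simp [hk]

theorem pv_items_foldl_setdefault {ν : Type} (ps : List (String × ν)) (o : PySem.Dict String ν)
    (hps : (ps.map Prod.fst).Nodup) :
    (ps.foldl (fun o gp => if o.contains gp.1 then o else o.insert gp.1 gp.2) o).items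
      = o.items ++ ps.filter (fun gp => !(o.contains gp.1)) := by
  induction ps generalizing o with
  | nil => simp
  | cons p ps ih =>
    have hps2 : (p.1 :: ps.map Prod.fst).Nodup := by
      rw [List.map_cons] at hps; exact hps
    have hps' := (List.nodup_cons.mp hps2).2
    have hph := (List.nodup_cons.mp hps2).1
    simp only [List.foldl_cons]
    by_cases hc : o.contains p.1 = true
    · rw [if_pos hc, ih o hps', List.filter_cons_of_neg (by simp [hc])]
    · have hc' : o.contains p.1 = false := by
        cases h : o.contains p.1
        · rfl
        · exact absurd h hc
      rw [if_neg (by simp [hc']), ih (o.insert p.1 p.2) hps',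
          PySem.Dict.items_insert_of_not_contains o _ hc',
          List.filter_cons_of_pos (by simp [hc'])]
      have : ps.filter (fun gp => !((o.insert p.1 p.2).contains gp.1))
          = ps.filter (fun gp => !(o.contains gp.1)) := by
        apply List.filter_congr
        intro gp hgp
        rw [PySem.Dict.contains_insert]
        have : gp.1 ≠ p.1 := by
          intro h
          exact hph (h ▸ List.mem_map_of_mem hgp)
        simp [this]
      rw [this, List.append_assoc, List.singleton_append]

theorem pv_h_tr (v : List (List String)) : pvH (pvTr v) = pvHB v := by
  unfold pvH pvTr pvHB
  rw [PySem.List.slice_from_neg_ofNat v 4 (by omega), PySem.List.slice_from_one,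
      PySem.List.slice_from_natCast]
  rw [List.tail_drop]
  congr 1
  congr 1
  omega

theorem pv_hw_rel (t : String) (h : t ∈ pvFixKeys) :
    pvH ([(PySem.Str.split? (pvFix.getD t ("", [])).1 "-").getD []]
         ++ (pvFix.getD t ("", [])).2.map (fun x => [x]))
      = pvFixB.getD t [] := by
  fin_cases h <;> rfl

theorem pv_h_w (g : String) (h : PySem.Str.slice g (some (-3)) none ∈ pvFixKeys) :
    pvH (pvW g) = pvP g := by
  have := pv_hw_rel _ h
  simpa [pvW, pvP] using this

-- ===== VERDICT (by name: the statement is the Claim_ definition above) =====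
theorem pv_ofList_nil_items {ν : Type} :
    (PySem.Dict.ofList ([] : List (String × ν))).items = [] := rfl

theorem pv_ofList_nil_contains {ν : Type} (x : String) :
    (PySem.Dict.ofList ([] : List (String × ν))).contains x = false := rfl

set_option maxHeartbeats 1600000 in
theorem clean2015_spec : Claim_equal_clean2015 := by
  unfold Claim_equal_clean2015
  intro res bl _hdom hpre
  obtain ⟨hp1, _hp2⟩ := hpre
  unfold Spec_clean2015 clean2015 clean2015_alt
  set d0 := PySem.Dict.ofList bl with hd0def
  have hnd0 : d0.keys.Nodup := PySem.Dict.nodup_keys_ofList bl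
  -- A, pass 1: every value truncated in place
  have hSnd : (PySem.List.sorted d0.keys (fun x => x) false).Nodup :=
    ((PySem.List.sorted_perm d0.keys (fun x => x) false).nodup_iff).mpr hnd0
  have h1 : (pvStep1 d0).items = d0.items.map (fun kv => (kv.1, pvTr kv.2)) := by
    unfold pvStep1
    rw [pv_items_foldl_insert_getD pvTr [] _ d0 hnd0 hSnd
        (fun g hg => (PySem.Dict.contains_iff_mem_keys d0 g).mpr
          ((PySem.List.mem_sorted _ _ _ g).mp hg))]
    apply List.map_congr_left
    rintro ⟨k, v⟩ hp
    have hk : k ∈ PySem.List.sorted d0.keys (fun x => x) false := by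
      rw [PySem.List.mem_sorted]
      simpa [PySem.Dict.keys] using List.mem_map_of_mem (f := Prod.fst) hp
    simp [hk]
  have hk1 : (pvStep1 d0).keys = d0.keys := by
    simp only [PySem.Dict.keys, h1, List.map_map]
    rfl
  have hnd1 : (pvStep1 d0).keys.Nodup := hk1 ▸ hnd0
  have hcont1 : ∀ x, (pvStep1 d0).contains x = d0.contains x := by
    intro x
    rw [PySem.Dict.contains_eq_decide_mem_keys, PySem.Dict.contains_eq_decide_mem_keys, hk1]
  -- A, pass 2: the hardcoded fixups
  have h2 : (pvStep2 res (pvStep1 d0)).items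
      = (pvStep1 d0).items.map (fun kv => if kv.1 ∈ pvSel res then (kv.1, pvW kv.1) else kv)
        ++ ((pvFirstOcc (pvSel res)).filter (fun g => !((pvStep1 d0).contains g))).map
            (fun g => (g, pvW g)) := by
    unfold pvStep2
    exact pv_items_foldl_insert_fun pvW (pvSel res) _ hnd1
  -- canonical form of A's result
  have hA : (pvStep2 res (pvStep1 d0)).items.map (fun kv => (kv.1, pvH kv.2))
      = d0.items.map (fun kv => (kv.1, if kv.1 ∈ pvSel res then pvP kv.1 else pvHB kv.2))
        ++ ((pvFirstOcc (pvSel res)).filter (fun g => !(d0.contains g))).map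
            (fun g => (g, pvP g)) := by
    rw [h2, List.map_append, h1, List.map_map, List.map_map, List.map_map]
    refine congrArg₂ (· ++ ·) ?_ ?_
    · apply List.map_congr_left
      rintro ⟨k, v⟩ hp
      by_cases hk : k ∈ pvSel res
      · simp [hk, pv_h_w k (hp1 k hk)]
      · simp [hk, pv_h_tr]
    · have hf : ((pvFirstOcc (pvSel res)).filter (fun g => !((pvStep1 d0).contains g)))
          = (pvFirstOcc (pvSel res)).filter (fun g => !(d0.contains g)) := by
        apply List.filter_congr
        intro x _
        rw [hcont1]
      rw [hf]
      apply List.map_congr_left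
      intro g hg
      have hgsel : g ∈ pvSel res := (pv_mem_firstOcc g _).mp (List.mem_of_mem_filter hg)
      simp [pv_h_w g (hp1 g hgsel)]
  -- B: the patch dict
  have hpatch : (pvPatch res).items = (pvFirstOcc (pvSel res)).map (fun g => (g, pvP g)) := by
    unfold pvPatch
    rw [pv_items_foldl_insert_fun pvP (pvSel res) _ (PySem.Dict.nodup_keys_ofList _)]
    simp [pv_ofList_nil_items, pv_ofList_nil_contains]
  have hpatchKeys : (pvPatch res).keys = pvFirstOcc (pvSel res) := by
    simp only [PySem.Dict.keys, hpatch, List.map_map]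
    exact (List.map_congr_left (fun a _ => rfl)).trans (List.map_id _)
  have hpatchNd : (pvPatch res).keys.Nodup := by
    rw [hpatchKeys]; exact pv_nodup_firstOcc _
  have hpc : ∀ g, (pvPatch res).contains g = decide (g ∈ pvSel res) := by
    intro g
    rw [PySem.Dict.contains_eq_decide_mem_keys, hpatchKeys]
    simp [pv_mem_firstOcc]
  have hpgetD : ∀ g ∈ pvSel res, (pvPatch res).getD g [] = pvP g := by
    intro g hg
    exact PySem.Dict.getD_of_mem_items _
      (by
        rw [hpatch]
        exact List.mem_map_of_mem (f := fun g => (g, pvP g)) ((pv_mem_firstOcc g _).mpr hg))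
      hpatchNd []
  -- B: the rebuild pass
  have hout1 : (pvOut1 res bl).items
      = d0.items.map (fun kv => (kv.1,
          if (pvPatch res).contains kv.1 then (pvPatch res).getD kv.1 [] else pvHB kv.2)) := by
    unfold pvOut1
    rw [← hd0def,
        PySem.Dict.items_foldl_insert_fresh d0.items Prod.fst
          (fun kv => if (pvPatch res).contains kv.1 then (pvPatch res).getD kv.1 [] else pvHB kv.2)
          (PySem.Dict.ofList ([] : List (String × List String)))
          (fun a _ => pv_ofList_nil_contains _)
          (by simpa [PySem.Dict.keys] using hnd0)]
    simp [pv_ofList_nil_items]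
  have hko1 : (pvOut1 res bl).keys = d0.keys := by
    simp only [PySem.Dict.keys, hout1, List.map_map]
    rfl
  have hcout1 : ∀ x, (pvOut1 res bl).contains x = d0.contains x := by
    intro x
    rw [PySem.Dict.contains_eq_decide_mem_keys, PySem.Dict.contains_eq_decide_mem_keys, hko1]
  -- B: the final setdefault pass, and the assembly
  rw [hA, pv_items_foldl_setdefault (pvPatch res).items (pvOut1 res bl)
        (by simpa [PySem.Dict.keys] using hpatchNd),
      hout1]
  refine congrArg₂ (· ++ ·) ?_ ?_
  · apply List.map_congr_left
    rintro ⟨k, v⟩ hp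
    by_cases hk : k ∈ pvSel res
    · simp [hpc, hk, hpgetD k hk]
    · simp [hpc, hk]
  · rw [hpatch, List.filter_map]
    congr 1
    apply List.filter_congr
    intro g _
    simp [Function.comp, hcout1 g]
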